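-- pv_equiv track=rewrite | github.com/Nunopdmp/contro_de_distribuicao_reduzido | algo.py | organizar_caminho
-- ===== SOURCE A (Python) =====
-- def organizar_caminho(posicoes):
--     # Organiza as posições por rua
--     ruas = {}
--     for pos in posicoes:
--         rua = pos // 100  # Identifica a rua
--         if rua not in ruas:
--             ruas[rua] = []
--         ruas[rua].append(pos)
--
--     # Ordena as ruas
--     ruas_ordenadas = sorted(ruas.keys())
--
--     caminho = []
--     sentido = True  # Define o sentido inicial (crescente)
--
--     for rua in ruas_ordenadas:
--         if sentido:
--             caminho.extend(sorted(ruas[rua]))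
--         else:
--             caminho.extend(sorted(ruas[rua], reverse=True))
--         sentido = not sentido  # Alterna o sentido para a próxima rua
--
--     return caminho
-- ===== SOURCE B (Python) =====
-- def organizar_caminho(posicoes):
--     # One full sort, then a single scan that emits maximal same-street runs,
--     # alternating direction (boustrophedon) without building a dict.
--     ordenado = sorted(posicoes)
--     caminho = []
--     asc = True
--     i = 0
--     n = len(ordenado)
--     while i < n:
--         j = i + 1
--         while j < n and ordenado[j] // 100 == ordenado[i] // 100:
--             j += 1
--         run = ordenado[i:j]
--         caminho += run if asc else run[::-1]
--         asc = not asc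
--         i = j
--     return caminho
-- ===== Notes on version B (the rewrite author's own statement) =====
-- stated objective: alternative
-- what changed: B replaces A's dict-of-streets with per-street sorts by one full sort followed by a single scan that emits maximal same-street (pos//100) runs, reversing every other run.
import Mathlib
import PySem

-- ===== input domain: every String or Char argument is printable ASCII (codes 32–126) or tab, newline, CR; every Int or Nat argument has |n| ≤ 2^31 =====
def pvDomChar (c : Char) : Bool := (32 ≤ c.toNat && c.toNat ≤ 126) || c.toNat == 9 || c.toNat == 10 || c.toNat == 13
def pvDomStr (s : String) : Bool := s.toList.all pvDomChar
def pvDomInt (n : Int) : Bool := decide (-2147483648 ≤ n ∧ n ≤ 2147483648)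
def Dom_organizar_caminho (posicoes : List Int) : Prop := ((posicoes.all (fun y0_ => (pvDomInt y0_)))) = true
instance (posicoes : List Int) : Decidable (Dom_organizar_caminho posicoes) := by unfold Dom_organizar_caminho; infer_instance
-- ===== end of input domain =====

-- B sorts once and scans maximal same-street runs instead of A's dict grouping with per-street sorts; same result, proved equal.

-- ===== PORT A =====
def organizar_caminho (posicoes : List Int) : List Int :=
  let ruas := posicoes.foldl (fun d pos =>
    let rua := PySem.Int.floordiv pos 100
    let d := if d.contains rua then d else d.insert rua ([] : List Int)
    d.insert rua (d.getD rua [] ++ [pos])) PySem.Dict.empty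
  let ruas_ordenadas := PySem.List.sorted ruas.keys (fun k => k) false
  -- every rua ∈ ruas, so Python's ruas[rua] is getD with unreachable default
  (ruas_ordenadas.foldl (fun (st : List Int × Bool) rua =>
    if st.2 then (st.1 ++ PySem.List.sorted (ruas.getD rua []) (fun x => x) false, !st.2)
    else (st.1 ++ PySem.List.sorted (ruas.getD rua []) (fun x => x) true, !st.2)) ([], true)).1

-- ===== PORT B =====
def pvKey (p : Int) : Int := PySem.Int.floordiv p 100

-- the outer while loop of Source B: each iteration consumes one maximal run of equal street
def pvRuns (asc : Bool) (l : List Int) : List Int :=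
  match l with
  | [] => []
  | x :: t =>
    let run := x :: t.takeWhile (fun y => pvKey y == pvKey x)
    let rest := t.dropWhile (fun y => pvKey y == pvKey x)
    (if asc then run else run.reverse) ++ pvRuns (!asc) rest
termination_by l.length
decreasing_by
  have := List.length_dropWhile_le (fun y => pvKey y == pvKey x) t
  simp; omega

def organizar_caminho_alt (posicoes : List Int) : List Int :=
  pvRuns true (PySem.List.sorted posicoes (fun x => x) false)

-- ===== PRECONDITION & SPEC =====
def Spec_organizar_caminho (posicoes : List Int) (out : List Int) : Prop := out = organizar_caminho_alt posicoes
instance (posicoes : List Int) (out : List Int) : Decidable (Spec_organizar_caminho posicoes out) := by unfold Spec_organizar_caminho; infer_instance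

-- ===== CLAIM (what is proved, stated in full; the proofs are below) =====
def Claim_equal_organizar_caminho : Prop := ∀ (posicoes : List Int), Dom_organizar_caminho posicoes → Spec_organizar_caminho posicoes (organizar_caminho posicoes)

-- ===== LEMMAS AND PROOFS =====

-- alternating emission over a key list
def pvEmit (f : Bool → Int → List Int) : Bool → List Int → List Int
  | _, [] => []
  | b, k :: ks => f b k ++ pvEmit f (!b) ks

theorem pvEmit_congr (f g : Bool → Int → List Int) (ks : List Int)
    (h : ∀ b k, k ∈ ks → f b k = g b k) : ∀ b, pvEmit f b ks = pvEmit g b ks := by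
  induction ks with
  | nil => intro b; rfl
  | cons k ks ih =>
    intro b
    simp only [pvEmit]
    rw [h b k (by simp), ih (fun b k hk => h b k (by simp [hk])) (!b)]

theorem pv_fold_emit (f g : Int → List Int) (ks : List Int) : ∀ (acc : List Int) (b : Bool),
    (ks.foldl (fun (st : List Int × Bool) k =>
      if st.2 then (st.1 ++ f k, !st.2) else (st.1 ++ g k, !st.2)) (acc, b)).1
    = acc ++ pvEmit (fun b k => if b then f k else g k) b ks := by
  induction ks with
  | nil => intro acc b; simp [pvEmit]
  | cons k ks ih =>
    intro acc b
    cases b <;> simp only [List.foldl_cons, if_true, Bool.not_true, Bool.not_false,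
      pvEmit] <;> rw [ih] <;> simp [List.append_assoc]


def pvStepA (d : PySem.Dict Int (List Int)) (pos : Int) : PySem.Dict Int (List Int) :=
  let rua := PySem.Int.floordiv pos 100
  let d := if d.contains rua then d else d.insert rua ([] : List Int)
  d.insert rua (d.getD rua [] ++ [pos])

theorem pv_getD_stepA (d : PySem.Dict Int (List Int)) (p k : Int) :
    (pvStepA d p).getD k [] = d.getD k [] ++ (if pvKey p == k then [p] else []) := by
  simp only [pvStepA, pvKey]
  by_cases hc : d.contains (PySem.Int.floordiv p 100) = true
  · rw [if_pos hc]
    by_cases hk : k = PySem.Int.floordiv p 100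
    · subst hk
      rw [PySem.Dict.getD_insert_self, if_pos (by simp)]
    · rw [PySem.Dict.getD_insert_of_ne _ _ _ hk,
        if_neg (by simp only [beq_iff_eq]; exact fun h => hk h.symm), List.append_nil]
  · rw [if_neg hc]
    by_cases hk : k = PySem.Int.floordiv p 100
    · subst hk
      rw [PySem.Dict.getD_insert_self, PySem.Dict.getD_insert_self,
        PySem.Dict.getD_of_not_contains d [] (by simpa using hc), if_pos (by simp)]
    · rw [PySem.Dict.getD_insert_of_ne _ _ _ hk, PySem.Dict.getD_insert_of_ne _ _ _ hk,
        if_neg (by simp only [beq_iff_eq]; exact fun h => hk h.symm), List.append_nil]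

theorem pv_keys_stepA (d : PySem.Dict Int (List Int)) (p : Int) :
    (pvStepA d p).keys = PySem.Set.add d.keys (pvKey p) := by
  simp only [pvStepA, pvKey]
  by_cases hc : d.contains (PySem.Int.floordiv p 100) = true
  · rw [if_pos hc, PySem.Dict.keys_insert_of_contains _ _ hc,
      PySem.Set.add_of_mem ((PySem.Dict.contains_iff_mem_keys d _).mp hc)]
  · rw [if_neg hc,
      PySem.Dict.keys_insert_of_contains _ _ (PySem.Dict.contains_insert_self _ _ _),
      PySem.Dict.keys_insert_of_not_contains _ _ (by simpa using hc),
      PySem.Set.add_of_not_mem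
        (fun hm => hc ((PySem.Dict.contains_iff_mem_keys d _).mpr hm))]

theorem pv_getD_foldA (k : Int) : ∀ (l : List Int) (d : PySem.Dict Int (List Int)),
    (l.foldl pvStepA d).getD k [] = d.getD k [] ++ l.filter (fun p => pvKey p == k) := by
  intro l
  induction l with
  | nil => intro d; simp
  | cons p l ih =>
    intro d
    simp only [List.foldl_cons, ih, pv_getD_stepA, List.filter_cons]
    by_cases h : (pvKey p == k) = true <;> simp [h]

theorem pv_keys_foldA : ∀ (l : List Int) (d : PySem.Dict Int (List Int)),
    (l.foldl pvStepA d).keys = PySem.Set.update d.keys (l.map pvKey) := by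
  intro l
  induction l with
  | nil => intro d; simp [PySem.Set.update_nil]
  | cons p l ih =>
    intro d
    simp only [List.foldl_cons, List.map_cons, ih, pv_keys_stepA, PySem.Set.update_cons]

theorem pv_sorted_rev (xs : List Int) :
    PySem.List.sorted xs (fun x => x) true = (PySem.List.sorted xs (fun x => x) false).reverse := by
  have hp : (PySem.List.sorted xs (fun x => x) true).Perm
      ((PySem.List.sorted xs (fun x => x) false).reverse) :=
    (PySem.List.sorted_perm _ _ _).trans
      (((List.reverse_perm _).trans (PySem.List.sorted_perm _ _ _)).symm)
  have h1 : (PySem.List.sorted xs (fun x => x) true).Pairwise (fun a b : Int => b ≤ a) := by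
    simpa using PySem.List.sorted_pairwise_rev xs (fun x => x)
  have h2 : ((PySem.List.sorted xs (fun x => x) false).reverse).Pairwise (fun a b : Int => b ≤ a) := by
    rw [List.pairwise_reverse]
    simpa using PySem.List.sorted_pairwise xs (fun x => x)
  exact List.Perm.eq_of_pairwise (fun a b _ _ h h' => le_antisymm h' h) h1 h2 hp

theorem pv_sorted_filter (p : Int → Bool) (xs : List Int) :
    PySem.List.sorted (xs.filter p) (fun x => x) false
      = (PySem.List.sorted xs (fun x => x) false).filter p := by
  have hpw : ((PySem.List.sorted xs (fun x => x) false).filter p).Pairwise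
      (fun a b : Int => a ≤ b) :=
    List.Pairwise.filter p (by simpa using PySem.List.sorted_pairwise xs (fun x => x))
  exact PySem.List.sorted_id_eq_of_perm_of_pairwise _ _
    (List.Perm.filter p (PySem.List.sorted_perm xs (fun x => x) false)) hpw

theorem pvKey_mono {a b : Int} (h : a ≤ b) : pvKey a ≤ pvKey b := by
  unfold pvKey
  rw [PySem.Int.floordiv_eq_ediv_of_pos (by norm_num), PySem.Int.floordiv_eq_ediv_of_pos (by norm_num)]
  exact Int.ediv_le_ediv (by norm_num) h

theorem pv_dropWhile_gt (k0 : Int) : ∀ (t : List Int), (t.map pvKey).Pairwise (· ≤ ·) →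
    (∀ y ∈ t, k0 ≤ pvKey y) →
    ∀ y ∈ t.dropWhile (fun y => pvKey y == k0), k0 < pvKey y := by
  intro t
  induction t with
  | nil => simp
  | cons z t ih =>
    intro hpw hle y hy
    rw [List.map_cons, List.pairwise_cons] at hpw
    simp only [List.dropWhile_cons] at hy
    by_cases hz : (pvKey z == k0) = true
    · rw [if_pos hz] at hy
      exact ih hpw.2 (fun y hy => hle y (List.mem_cons_of_mem _ hy)) y hy
    · rw [if_neg hz] at hy
      rcases List.mem_cons.mp hy with rfl | hyt
      · exact lt_of_le_of_ne (hle y (List.mem_cons_self))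
          (fun h => hz (by simp [← h]))
      · have h1 : k0 < pvKey z := lt_of_le_of_ne (hle z (List.mem_cons_self))
          (fun h => hz (by simp [← h]))
        exact lt_of_lt_of_le h1 (hpw.1 _ (List.mem_map_of_mem hyt))

theorem pv_runs_emit (n : Nat) : ∀ (s : List Int), s.length ≤ n → ∀ (b : Bool),
    (s.map pvKey).Pairwise (· ≤ ·) →
    pvRuns b s = pvEmit (fun b k => if b then s.filter (fun p => pvKey p == k)
        else (s.filter (fun p => pvKey p == k)).reverse)
      b (PySem.List.sorted (PySem.Set.ofList (s.map pvKey)) (fun x => x) false) := by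
  induction n with
  | zero =>
    intro s hlen b _
    have : s = [] := List.eq_nil_of_length_eq_zero (Nat.le_zero.mp hlen)
    subst this
    have h0 : PySem.List.sorted (PySem.Set.ofList (([] : List Int).map pvKey)) (fun x => x) false = [] := by
      simp [PySem.List.sorted_eq_nil_iff, PySem.Set.ofList]
    rw [h0]
    simp only [pvRuns]
    rfl
  | succ n ihn =>
    intro s hlen b hpw
    match s with
    | [] =>
      have h0 : PySem.List.sorted (PySem.Set.ofList (([] : List Int).map pvKey)) (fun x => x) false = [] := by
        simp [PySem.List.sorted_eq_nil_iff, PySem.Set.ofList]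
      rw [h0]
      simp only [pvRuns]
      rfl
    | x :: t =>
    rw [List.map_cons, List.pairwise_cons] at hpw
    have htail : (t.map pvKey).Pairwise (· ≤ ·) := hpw.2
    have hle : ∀ y ∈ t, pvKey x ≤ pvKey y := fun y hy => hpw.1 _ (List.mem_map_of_mem hy)
    have hgt : ∀ y ∈ t.dropWhile (fun y => pvKey y == pvKey x), pvKey x < pvKey y :=
      pv_dropWhile_gt (pvKey x) t htail hle
    have htw : ∀ y ∈ t.takeWhile (fun y => pvKey y == pvKey x), pvKey y = pvKey x :=
      fun y hy => by simpa using List.mem_takeWhile_imp (p := fun y => pvKey y == pvKey x) hy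
    have hrestpw : ((t.dropWhile (fun y => pvKey y == pvKey x)).map pvKey).Pairwise (· ≤ ·) :=
      List.Pairwise.sublist (List.Sublist.map pvKey (List.dropWhile_sublist _)) htail
    have hndrest : (PySem.List.sorted (PySem.Set.ofList
        ((t.dropWhile (fun y => pvKey y == pvKey x)).map pvKey)) (fun x => x) false).Nodup :=
      ((PySem.List.sorted_perm _ _ _).nodup_iff).mpr (PySem.Set.nodup_ofList _)
    have hmemrest : ∀ m ∈ PySem.List.sorted (PySem.Set.ofList
        ((t.dropWhile (fun y => pvKey y == pvKey x)).map pvKey)) (fun x => x) false,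
        pvKey x < m := by
      intro m hm
      rw [PySem.List.mem_sorted, PySem.Set.mem_ofList, List.mem_map] at hm
      obtain ⟨y, hy, rfl⟩ := hm
      exact hgt y hy
    have hks : PySem.List.sorted (PySem.Set.ofList ((x :: t).map pvKey)) (fun x => x) false
        = pvKey x :: PySem.List.sorted (PySem.Set.ofList
            ((t.dropWhile (fun y => pvKey y == pvKey x)).map pvKey)) (fun x => x) false := by
      apply PySem.List.sorted_eq_of_perm_of_pairwise_lt
      · apply (List.perm_ext_iff_of_nodup
          (List.nodup_cons.mpr ⟨fun hm => lt_irrefl _ (hmemrest _ hm), hndrest⟩)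
          (PySem.Set.nodup_ofList _)).mpr
        intro a
        simp only [List.mem_cons, PySem.List.mem_sorted, PySem.Set.mem_ofList, List.mem_map]
        constructor
        · rintro (rfl | ⟨y, hy, rfl⟩)
          · exact ⟨x, Or.inl rfl, rfl⟩
          · exact ⟨y, Or.inr (List.Sublist.mem hy (List.dropWhile_sublist _)), rfl⟩
        · rintro ⟨y, hy, rfl⟩
          rcases hy with rfl | hyt
          · exact Or.inl rfl
          · rw [← List.takeWhile_append_dropWhile
              (p := fun y => pvKey y == pvKey x) (l := t)] at hyt
            rcases List.mem_append.mp hyt with h | h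
            · exact Or.inl (htw y h)
            · exact Or.inr ⟨y, h, rfl⟩
      · exact List.pairwise_cons.mpr ⟨hmemrest, PySem.List.sorted_ofList_pairwise_lt _⟩
    have hfilter : (x :: t).filter (fun p => pvKey p == pvKey x)
        = x :: t.takeWhile (fun y => pvKey y == pvKey x) := by
      rw [List.filter_cons_of_pos (by simp)]
      congr 1
      conv_lhs => rw [← List.takeWhile_append_dropWhile
        (p := fun y => pvKey y == pvKey x) (l := t)]
      rw [List.filter_append,
        List.filter_eq_self.mpr
          (fun y hy => List.mem_takeWhile_imp (p := fun y => pvKey y == pvKey x) hy),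
        List.filter_eq_nil_iff.mpr (fun y hy => by
          simp only [beq_iff_eq]
          exact fun h => lt_irrefl _ (h ▸ hgt y hy)), List.append_nil]
    have hfilter2 : ∀ k, pvKey x < k → (x :: t).filter (fun p => pvKey p == k)
        = (t.dropWhile (fun y => pvKey y == pvKey x)).filter (fun p => pvKey p == k) := by
      intro k hk
      rw [List.filter_cons_of_neg (by simp only [beq_iff_eq]; exact fun h => lt_irrefl _ (h ▸ hk))]
      conv_lhs => rw [← List.takeWhile_append_dropWhile
        (p := fun y => pvKey y == pvKey x) (l := t)]
      rw [List.filter_append,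
        List.filter_eq_nil_iff.mpr (fun y hy => by
          simp only [beq_iff_eq]
          exact fun h => lt_irrefl _ ((htw y hy ▸ h) ▸ hk)), List.nil_append]
    have hlenrest : (t.dropWhile (fun y => pvKey y == pvKey x)).length ≤ n := by
      have := List.length_dropWhile_le (fun y => pvKey y == pvKey x) t
      simp at hlen
      omega
    rw [hks]
    simp only [pvRuns, pvEmit]
    rw [ihn _ hlenrest (!b) hrestpw,
      pvEmit_congr _ (fun b k => if b then (x :: t).filter (fun p => pvKey p == k)
          else ((x :: t).filter (fun p => pvKey p == k)).reverse) _
        (fun b k hk => by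
          beta_reduce
          rw [hfilter2 k (hmemrest k hk)]) (!b),
      hfilter]

theorem organizar_caminho_spec : Claim_equal_organizar_caminho := by
  intro posicoes _
  unfold Spec_organizar_caminho organizar_caminho organizar_caminho_alt
  show ((PySem.List.sorted (posicoes.foldl pvStepA PySem.Dict.empty).keys (fun k => k) false).foldl
      (fun (st : List Int × Bool) rua =>
        if st.2 then (st.1 ++ PySem.List.sorted ((posicoes.foldl pvStepA PySem.Dict.empty).getD rua []) (fun x => x) false, !st.2)
        else (st.1 ++ PySem.List.sorted ((posicoes.foldl pvStepA PySem.Dict.empty).getD rua []) (fun x => x) true, !st.2))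
      ([], true)).1
    = pvRuns true (PySem.List.sorted posicoes (fun x => x) false)
  have hs : (PySem.List.sorted posicoes (fun x => x) false).Pairwise (fun a b : Int => a ≤ b) := by
    simpa using PySem.List.sorted_pairwise posicoes (fun x => x)
  have hpair : ((PySem.List.sorted posicoes (fun x => x) false).map pvKey).Pairwise (· ≤ ·) :=
    List.pairwise_map.mpr (hs.imp (fun h => pvKey_mono h))
  have hkeys : (posicoes.foldl pvStepA PySem.Dict.empty).keys
      = PySem.Set.ofList (posicoes.map pvKey) := by
    rw [pv_keys_foldA, PySem.Dict.keys_empty, PySem.Set.update_nil_left]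
  have hperm : (PySem.Set.ofList (posicoes.map pvKey)).Perm
      (PySem.Set.ofList (((PySem.List.sorted posicoes (fun x => x) false).map pvKey))) := by
    apply (List.perm_ext_iff_of_nodup (PySem.Set.nodup_ofList _) (PySem.Set.nodup_ofList _)).mpr
    intro a
    rw [PySem.Set.mem_ofList, PySem.Set.mem_ofList]
    exact (List.Perm.mem_iff (List.Perm.map pvKey (PySem.List.sorted_perm posicoes _ false))).symm
  have hks12 : PySem.List.sorted (PySem.Set.ofList (posicoes.map pvKey)) (fun k => k) false
      = PySem.List.sorted (PySem.Set.ofList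
          (((PySem.List.sorted posicoes (fun x => x) false).map pvKey))) (fun k => k) false :=
    PySem.List.sorted_eq_sorted_of_perm _ _ _ (fun a b h => h) hperm
  have hfun : (fun (b : Bool) k =>
        if b then PySem.List.sorted ((posicoes.foldl pvStepA PySem.Dict.empty).getD k []) (fun x => x) false
        else PySem.List.sorted ((posicoes.foldl pvStepA PySem.Dict.empty).getD k []) (fun x => x) true)
      = (fun (b : Bool) k =>
        if b then (PySem.List.sorted posicoes (fun x => x) false).filter (fun p => pvKey p == k)
        else ((PySem.List.sorted posicoes (fun x => x) false).filter (fun p => pvKey p == k)).reverse) := by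
    funext b k
    rw [pv_getD_foldA, PySem.Dict.getD_empty, List.nil_append]
    cases b
    · simp only [Bool.false_eq_true, if_false]
      rw [pv_sorted_rev, pv_sorted_filter]
    · simp only [if_true]
      rw [pv_sorted_filter]
  rw [pv_fold_emit, List.nil_append, hkeys, hks12, hfun,
    pv_runs_emit (PySem.List.sorted posicoes (fun x => x) false).length _ le_rfl true hpair]
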